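-- pv_equiv track=rewrite | github.com/bioconda/bioconda-recipes | recipes/lja/py/resolution/utils/kmers.py | _split_seq_ignored_char
-- ===== SOURCE A (Python) =====
-- def _split_seq_ignored_char(seq, ignored_chars=None):
--     if ignored_chars is None:
--         return [(0, seq)]
--     i, j = 0, 0
--     split_seqs = []
--     while j < len(seq):
--         if seq[j] in ignored_chars:
--             if i != j:
--                 split_seq = seq[i:j]
--                 assert len(ignored_chars & set(split_seq)) == 0
--                 split_seqs.append((i, split_seq))
--             i = j + 1
--         j += 1
--     if i < len(seq):
--         assert len(ignored_chars & set(seq[i:])) == 0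
--         split_seqs.append((i, seq[i:]))
--     return split_seqs
-- ===== SOURCE B (Python) =====
-- def _split_seq_ignored_char(seq, ignored_chars=None):
--     if ignored_chars is None:
--         return [(0, seq)]
--     seps = [idx for idx, c in enumerate(seq) if c in ignored_chars]
--     segments = []
--     prev = -1
--     for s in seps + [len(seq)]:
--         if s - prev > 1:
--             segment = seq[prev + 1:s]
--             assert len(ignored_chars & set(segment)) == 0
--             segments.append((prev + 1, segment))
--         prev = s
--     return segments
-- ===== Notes on version B (the rewrite author's own statement) =====
-- stated objective: alternative
-- what changed: Replaces A's char-by-char flush loop with mutable segment-start/cursor state by first building the list of separator positions and then making one pass over the gaps between consecutive separators.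
import Mathlib
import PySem

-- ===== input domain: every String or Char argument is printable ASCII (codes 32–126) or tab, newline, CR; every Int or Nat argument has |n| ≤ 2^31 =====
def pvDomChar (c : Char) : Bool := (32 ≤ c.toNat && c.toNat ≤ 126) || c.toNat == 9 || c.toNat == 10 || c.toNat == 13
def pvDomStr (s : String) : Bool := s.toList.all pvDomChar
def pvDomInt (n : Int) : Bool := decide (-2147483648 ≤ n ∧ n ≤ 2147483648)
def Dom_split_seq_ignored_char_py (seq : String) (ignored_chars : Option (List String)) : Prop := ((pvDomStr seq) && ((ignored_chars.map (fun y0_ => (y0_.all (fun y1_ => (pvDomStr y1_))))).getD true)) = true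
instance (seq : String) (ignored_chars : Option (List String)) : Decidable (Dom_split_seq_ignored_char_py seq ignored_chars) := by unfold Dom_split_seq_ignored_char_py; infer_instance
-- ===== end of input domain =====

-- B restructures A's char-by-char flush loop into a separator-position table plus one pass
-- over the gaps between consecutive separators (objective: alternative decomposition).
-- A's asserts always pass (each emitted segment contains no ignored character by
-- construction, since ignored_chars is a set of strings), so they are not modelled.

-- ===== PORT A =====
-- the while loop of A: walks chars (the suffix of `full` starting at index j),
-- carrying segment start i, cursor j and the accumulator; returns final (i, acc)
def pvLoopA (ign : List String) (full : List Char) :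
    List Char → Nat → Nat → List (Int × String) → (Nat × List (Int × String))
  | [], i, _, acc => (i, acc)
  | c :: rest, i, j, acc =>
    if ign.contains (String.singleton c) then
      pvLoopA ign full rest (j+1) (j+1)
        (if i ≠ j then
           acc ++ [((i : Int), String.ofList (PySem.List.slice full (some (i:Int)) (some (j:Int))))]
         else acc)
    else
      pvLoopA ign full rest i (j+1) acc

def split_seq_ignored_char_py (seq : String) (ignored_chars : Option (List String)) : List (Int × String) :=
  match ignored_chars with
  | none => [((0:Int), seq)]
  | some ign =>
    let chars := seq.toList
    let r := pvLoopA ign chars chars 0 0 []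
    if r.1 < chars.length then
      r.2 ++ [((r.1 : Int), String.ofList (PySem.List.slice chars (some ((r.1:Nat):Int)) none))]
    else r.2

-- ===== PORT B =====
-- one step of B's loop over `seps + [len(seq)]`: state is (prev, segments)
def pvStepB (ign : List String) (full : List Char) :
    (Int × List (Int × String)) → Int → (Int × List (Int × String))
  | (prev, acc), s =>
    if s - prev > 1 then
      (s, acc ++ [((prev + 1), String.ofList (PySem.List.slice full (some (prev+1)) (some s)))])
    else (s, acc)

def split_seq_ignored_char_py_alt (seq : String) (ignored_chars : Option (List String)) : List (Int × String) :=
  match ignored_chars with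
  | none => [((0:Int), seq)]
  | some ign =>
    let chars := seq.toList
    let seps := ((PySem.List.enumerate chars 0).filter
        (fun p => ign.contains (String.singleton p.2))).map (·.1)
    ((seps ++ [((chars.length : Nat) : Int)]).foldl (pvStepB ign chars) ((-1 : Int), [])).2

-- ===== PRECONDITION & SPEC =====
def Spec_split_seq_ignored_char_py (seq : String) (ignored_chars : Option (List String)) (out : List (Int × String)) : Prop := out = split_seq_ignored_char_py_alt seq ignored_chars
instance (seq : String) (ignored_chars : Option (List String)) (out : List (Int × String)) : Decidable (Spec_split_seq_ignored_char_py seq ignored_chars out) := by unfold Spec_split_seq_ignored_char_py; infer_instance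

-- ===== CLAIM (what is proved, stated in full; the proofs are below) =====
def Claim_equal_split_seq_ignored_char_py : Prop := ∀ (seq : String) (ignored_chars : Option (List String)), Dom_split_seq_ignored_char_py seq ignored_chars → Spec_split_seq_ignored_char_py seq ignored_chars (split_seq_ignored_char_py seq ignored_chars)

-- ===== LEMMAS AND PROOFS =====

-- the separator positions of `rest`, whose first character sits at index j of the full list
def pvSeps (ign : List String) : Nat → List Char → List Int
  | _, [] => []
  | j, c :: rest =>
    if ign.contains (String.singleton c) then (j : Int) :: pvSeps ign (j+1) rest
    else pvSeps ign (j+1) rest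

theorem pvSeps_eq (ign : List String) :
    ∀ (chars : List Char) (j : Nat),
      ((PySem.List.enumerate chars ((j:Nat):Int)).filter
          (fun p => ign.contains (String.singleton p.2))).map (·.1)
        = pvSeps ign j chars := by
  intro chars
  induction chars with
  | nil => intro j; simp [PySem.List.enumerate_nil, pvSeps]
  | cons c rest ih =>
    intro j
    have hr := ih (j+1)
    rw [Nat.cast_add, Nat.cast_one] at hr
    rw [PySem.List.enumerate_cons, List.filter_cons]
    by_cases hc : ign.contains (String.singleton c) = true
    · simp only [hc, if_true, List.map_cons, pvSeps, hr]
    · simp only [hc, Bool.false_eq_true, if_false, pvSeps, hr]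

theorem pvMain (ign : List String) (full : List Char) :
    ∀ (rest : List Char) (i j : Nat) (acc : List (Int × String)),
      j + rest.length = full.length → i ≤ j →
      (let r := pvLoopA ign full rest i j acc
       if r.1 < full.length then
         r.2 ++ [((r.1 : Int), String.ofList (PySem.List.slice full (some ((r.1:Nat):Int)) none))]
       else r.2)
      = ((pvSeps ign j rest ++ [((full.length : Nat) : Int)]).foldl
            (pvStepB ign full) (((i:Nat):Int) - 1, acc)).2 := by
  intro rest
  induction rest with
  | nil =>
    intro i j acc hlen hij
    have hj : j = full.length := by simpa using hlen
    subst hj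
    simp only [pvLoopA, pvSeps, List.nil_append, List.foldl_cons, List.foldl_nil, pvStepB]
    by_cases hi : i < full.length
    · have hcond : ((full.length : Int)) - (((i:Nat):Int) - 1) > 1 := by
        omega
      simp only [hcond, if_pos hi]
      have harg : ((i:Nat):Int) - 1 + 1 = ((i:Nat):Int) := by ring
      rw [harg]
      congr 2
      rw [PySem.List.slice_natCast, PySem.List.slice_from_natCast]
      rw [List.take_of_length_le (by simp)]
    · have hcond : ¬ (((full.length : Int)) - (((i:Nat):Int) - 1) > 1) := by omega
      simp [hi, hcond]
  | cons c rest ih =>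
    intro i j acc hlen hij
    have hlen' : (j+1) + rest.length = full.length := by simpa [Nat.add_assoc, Nat.add_comm, Nat.add_left_comm] using hlen
    simp only [pvLoopA, pvSeps]
    by_cases hc : ign.contains (String.singleton c)
    · simp only [hc, if_pos, List.cons_append, List.foldl_cons]
      by_cases hieqj : i = j
      · subst hieqj
        have hcond : ¬ (((i:Nat):Int) - (((i:Nat):Int) - 1) > 1) := by omega
        simp only [pvStepB, hcond, ne_eq, not_true_eq_false, if_false]
        rw [ih (i+1) (i+1) acc hlen' (le_refl _),
          show ((((i+1:Nat)):Int) - 1) = ((i:Nat):Int) from by push_cast; ring]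
      · have hij' : i < j := lt_of_le_of_ne hij hieqj
        have hcond : (((j:Nat):Int)) - (((i:Nat):Int) - 1) > 1 := by omega
        simp only [pvStepB, ne_eq, hieqj, not_false_eq_true, if_true, if_pos hcond]
        rw [ih (j+1) (j+1) _ hlen' (le_refl _),
          show ((((j+1:Nat)):Int) - 1) = ((j:Nat):Int) from by push_cast; ring]
        rw [show ((i:Nat):Int) - 1 + 1 = ((i:Nat):Int) from by ring]
    · simp only [hc, Bool.false_eq_true, not_false_eq_true, if_neg]
      exact ih i (j+1) acc hlen' (Nat.le_succ_of_le hij)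

-- ===== VERDICT (by name: the statement is the Claim_ definition above) =====
theorem split_seq_ignored_char_py_spec : Claim_equal_split_seq_ignored_char_py := by
  intro seq ignored_chars _
  unfold Spec_split_seq_ignored_char_py
  match ignored_chars with
  | none => rfl
  | some ign =>
    simp only [split_seq_ignored_char_py, split_seq_ignored_char_py_alt]
    have h0 : (0 : Int) = ((0:Nat):Int) := by norm_num
    rw [show ((PySem.List.enumerate seq.toList 0).filter
          (fun p => ign.contains (String.singleton p.2))).map (·.1)
        = pvSeps ign 0 seq.toList from by
          simpa using pvSeps_eq ign seq.toList 0]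
    have := pvMain ign seq.toList seq.toList 0 0 [] (by simp) (le_refl 0)
    simpa using this
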